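-- pv_equiv track=rewrite | github.com/shg9411/algo | algo_py/k/2.py | solve
-- ===== SOURCE A (Python) =====
-- from collections import deque
--
-- def solve(place):
--     people = []
--     for i in range(5):
--         for j in range(5):
--             if place[i][j] == 'P':
--                 people.append((i, j))
--     for person in people:
--         tmp = [place[i][:] for i in range(5)]
--         visit = [[0]*5 for _ in range(5)]
--         q = deque([person])
--         visit[person[0]][person[1]] = 1
--         dist = 0
--         while q:
--             dist += 1
--             for _ in range(len(q)):
--                 i, j = q.popleft()
--                 for _i, _j in ((0, 1), (0, -1), (1, 0), (-1, 0)):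
--                     ti, tj = i+_i, j+_j
--                     if 0 <= ti < 5 and 0 <= tj < 5 and not visit[ti][tj] and tmp[ti][tj] != 'X':
--                         if dist<=2 and tmp[ti][tj]=='P':
--                             return 0
--                         visit[ti][tj] = 1
--                         q.append((ti, tj))
--
--     return 1
-- ===== SOURCE B (Python) =====
-- def solve(place):
--     people = [(i, j) for i in range(5) for j in range(5) if place[i][j] == 'P']
--     for i, j in people:
--         if any(0 <= i + di < 5 and 0 <= j + dj < 5 and place[i + di][j + dj] == 'P'
--                for di, dj in ((0, 1), (0, -1), (1, 0), (-1, 0))):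
--             return 0
--         if any(0 <= i + di < 5 and 0 <= j + dj < 5 and place[i + di][j + dj] == 'P'
--                and place[i + di // 2][j + dj // 2] != 'X'
--                for di, dj in ((0, 2), (0, -2), (2, 0), (-2, 0))):
--             return 0
--         if any(0 <= i + di < 5 and 0 <= j + dj < 5 and place[i + di][j + dj] == 'P'
--                and (place[i + di][j] != 'X' or place[i][j + dj] != 'X')
--                for di, dj in ((1, 1), (1, -1), (-1, 1), (-1, -1))):
--             return 0
--     return 1
-- ===== Notes on version B (the rewrite author's own statement) =====
-- stated objective: simpler
-- what changed: Replaces the per-person breadth-first search (deque, visit matrix, grid copy) by twelve direct offset checks per person: the 4 distance-1 cells, the 4 straight distance-2 cells guarded by their single intermediate cell not being 'X', and the 4 diagonal cells guarded by at least one of their two intermediate cells not being 'X'.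
import Mathlib
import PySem

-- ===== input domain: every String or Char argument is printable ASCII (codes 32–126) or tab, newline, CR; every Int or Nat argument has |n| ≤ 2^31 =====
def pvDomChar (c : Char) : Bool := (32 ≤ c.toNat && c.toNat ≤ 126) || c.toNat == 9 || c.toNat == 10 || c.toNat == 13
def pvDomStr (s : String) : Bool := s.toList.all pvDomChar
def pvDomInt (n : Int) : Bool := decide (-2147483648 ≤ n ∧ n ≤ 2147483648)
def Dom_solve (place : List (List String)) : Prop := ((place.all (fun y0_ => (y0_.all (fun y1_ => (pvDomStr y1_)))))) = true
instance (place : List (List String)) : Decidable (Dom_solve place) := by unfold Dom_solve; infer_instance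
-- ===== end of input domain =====

-- B replaces the per-person breadth-first search by twelve direct offset checks
-- (distance-1 cells, straight distance-2 cells via their single intermediate,
-- diagonal cells via either intermediate); objective: simpler.

-- ===== PORT A =====
-- grid access place[i][j]; total via getD, exact inside Pre_solve (Python raises IndexError outside)
def pvG (place : List (List String)) (i j : Int) : String :=
  PySem.List.pyGetD (PySem.List.pyGetD place i []) j ""

def pvInb (i j : Int) : Bool := decide (0 ≤ i ∧ i < 5 ∧ 0 ≤ j ∧ j < 5)

-- the offsets ((0,1),(0,-1),(1,0),(-1,0))
def pvNbrs : List (Int × Int) := [(0,1),(0,-1),(1,0),(-1,0)]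

-- people collection: nested for over range(5) appending (i,j) when cell == 'P'
def pvPeople (place : List (List String)) : List (Int × Int) :=
  (PySem.List.pyRange 0 5 1).foldl
    (fun acc i => (PySem.List.pyRange 0 5 1).foldl
      (fun acc2 j => if pvG place i j == "P" then acc2 ++ [(i, j)] else acc2) acc) []

-- the inner `for _i,_j in (...)` of the BFS: visit is the visit matrix as its indicator function (exact)
def pvProcNbrs (place : List (List String)) (dist i j : Int) :
    List (Int × Int) → (Int → Int → Bool) → List (Int × Int) →
    Option ((Int → Int → Bool) × List (Int × Int))
  | [], visit, q => some (visit, q)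
  | d :: rest, visit, q =>
    let ti := i + d.1
    let tj := j + d.2
    if pvInb ti tj && !visit ti tj && (pvG place ti tj != "X") then
      if decide (dist ≤ 2) && (pvG place ti tj == "P") then none   -- `return 0`
      else pvProcNbrs place dist i j rest
        (fun a b => (decide (a = ti) && decide (b = tj)) || visit a b) (q ++ [(ti, tj)])
    else pvProcNbrs place dist i j rest visit q

-- `for _ in range(len(q)): i,j = q.popleft() …`: one BFS level
def pvProcLevel (place : List (List String)) (dist : Int) :
    List (Int × Int) → (Int → Int → Bool) → List (Int × Int) →
    Option ((Int → Int → Bool) × List (Int × Int))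
  | [], visit, acc => some (visit, acc)
  | m :: qs, visit, acc =>
    match pvProcNbrs place dist m.1 m.2 pvNbrs visit acc with
    | none => none
    | some (v', acc') => pvProcLevel place dist qs v' acc'

-- `while q:` — fuel 30 is a totality guard only: the Python loop marks each of the 25
-- cells at most once, so it runs at most 26 levels and never reaches the fuel bound
def pvBfs (place : List (List String)) :
    Nat → List (Int × Int) → (Int → Int → Bool) → Int → Bool
  | 0, _, _, _ => false
  | fuel + 1, q, visit, dist =>
    if q.isEmpty then false
    else
      match pvProcLevel place (dist + 1) q visit [] with
      | none => true
      | some (v', q') => pvBfs place fuel q' v' (dist + 1)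

-- `for person in people:` returning 0 when the BFS finds a close person
def pvLoopA (place : List (List String)) : List (Int × Int) → Int
  | [] => 1
  | p :: rest =>
    if pvBfs place 30 [p] (fun a b => decide (a = p.1) && decide (b = p.2)) 0 then 0
    else pvLoopA place rest

def solve (place : List (List String)) : Int := pvLoopA place (pvPeople place)

-- ===== PORT B =====
def pvStraight : List (Int × Int) := [(0,2),(0,-2),(2,0),(-2,0)]
def pvDiag : List (Int × Int) := [(1,1),(1,-1),(-1,1),(-1,-1)]

-- distance-1 orthogonal neighbours
def pvCheck1 (place : List (List String)) (i j : Int) : Bool :=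
  pvNbrs.any fun d => pvInb (i + d.1) (j + d.2) && (pvG place (i + d.1) (j + d.2) == "P")

-- straight distance-2 cells, blocked iff the single intermediate is 'X'
def pvCheck2 (place : List (List String)) (i j : Int) : Bool :=
  pvStraight.any fun d =>
    pvInb (i + d.1) (j + d.2) && (pvG place (i + d.1) (j + d.2) == "P") &&
      (pvG place (i + PySem.Int.floordiv d.1 2) (j + PySem.Int.floordiv d.2 2) != "X")

-- diagonal cells, blocked iff both intermediates are 'X'
def pvCheck3 (place : List (List String)) (i j : Int) : Bool :=
  pvDiag.any fun d =>
    pvInb (i + d.1) (j + d.2) && (pvG place (i + d.1) (j + d.2) == "P") &&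
      ((pvG place (i + d.1) j != "X") || (pvG place i (j + d.2) != "X"))

-- `[(i,j) for i in range(5) for j in range(5) if place[i][j]=='P']`
def pvPeopleB (place : List (List String)) : List (Int × Int) :=
  (PySem.List.pyRange 0 5 1).flatMap fun i =>
    ((PySem.List.pyRange 0 5 1).filter (fun j => pvG place i j == "P")).map fun j => (i, j)

def pvLoopB (place : List (List String)) : List (Int × Int) → Int
  | [] => 1
  | p :: rest =>
    if pvCheck1 place p.1 p.2 then 0
    else if pvCheck2 place p.1 p.2 then 0
    else if pvCheck3 place p.1 p.2 then 0
    else pvLoopB place rest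

def solve_alt (place : List (List String)) : Int := pvLoopB place (pvPeopleB place)

-- ===== PRECONDITION & SPEC =====
-- A indexes place[i][j] for all 0 ≤ i,j < 5, so it raises IndexError unless the grid
-- has at least 5 rows whose first 5 each have at least 5 entries.
def Pre_solve (place : List (List String)) : Prop :=
  5 ≤ place.length ∧ ∀ r ∈ place.take 5, 5 ≤ r.length
instance (place : List (List String)) : Decidable (Pre_solve place) := by
  unfold Pre_solve; infer_instance

def pvWitness_solve : List (List String) :=
  [["P","O","X","O","P"],["O","X","O","X","O"],["X","O","O","O","X"],["O","X","O","X","O"],["P","O","X","O","P"]]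

def Spec_solve (place : List (List String)) (out : Int) : Prop := out = solve_alt place
instance (place : List (List String)) (out : Int) : Decidable (Spec_solve place out) := by
  unfold Spec_solve; infer_instance

-- ===== CLAIM (what is proved, stated in full; the proofs are below) =====
def Claim_equal_solve : Prop :=
  ∀ (place : List (List String)), Dom_solve place → Pre_solve place → Spec_solve place (solve place)

-- ===== LEMMAS AND PROOFS =====

theorem pvInb_iff (i j : Int) : pvInb i j = true ↔ 0 ≤ i ∧ i < 5 ∧ 0 ≤ j ∧ j < 5 := by
  simp [pvInb]

-- invariant: the root is visited, and every visited cell is the root or not a 'P'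
def pvInv (place : List (List String)) (pi pj : Int) (visit : Int → Int → Bool) : Prop :=
  visit pi pj = true ∧ ∀ a b, visit a b = true → (a = pi ∧ b = pj) ∨ pvG place a b ≠ "P"

theorem procNbrs_none_iff (place : List (List String)) (pi pj dist i j : Int)
    (hd : dist ≤ 2) :
    ∀ (offs : List (Int × Int)) (visit : Int → Int → Bool) (q : List (Int × Int)),
      pvInv place pi pj visit →
      (pvProcNbrs place dist i j offs visit q = none ↔
        ∃ d ∈ offs, pvInb (i + d.1) (j + d.2) = true ∧ pvG place (i + d.1) (j + d.2) = "P" ∧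
          ¬(i + d.1 = pi ∧ j + d.2 = pj)) := by
  intro offs
  induction offs with
  | nil => intro visit q _; simp [pvProcNbrs]
  | cons d rest ih =>
    intro visit q hInv
    obtain ⟨hroot, hvis⟩ := hInv
    simp only [pvProcNbrs]
    by_cases hg : (pvInb (i + d.1) (j + d.2) && !visit (i + d.1) (j + d.2) &&
        (pvG place (i + d.1) (j + d.2) != "X")) = true
    · rw [if_pos hg]
      simp only [Bool.and_eq_true, Bool.not_eq_true'] at hg
      obtain ⟨⟨hinb, hnv⟩, _⟩ := hg
      by_cases hp : pvG place (i + d.1) (j + d.2) = "P"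
      · rw [if_pos (by rw [hp]; simp; omega)]
        simp only [true_iff]
        refine ⟨d, List.mem_cons_self, hinb, hp, ?_⟩
        rintro ⟨e1, e2⟩
        rw [e1, e2, hroot] at hnv
        exact absurd hnv (by simp)
      · rw [if_neg (by simp [hp])]
        have hInv' : pvInv place pi pj
            (fun a b => (decide (a = i + d.1) && decide (b = j + d.2)) || visit a b) := by
          constructor
          · simp [hroot]
          · intro a b hab
            simp only [Bool.or_eq_true, Bool.and_eq_true, decide_eq_true_eq] at hab
            rcases hab with ⟨rfl, rfl⟩ | hab
            · exact Or.inr hp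
            · exact hvis a b hab
        rw [ih _ _ hInv']
        constructor
        · rintro ⟨d0, hd0, hrest⟩
          exact ⟨d0, List.mem_cons_of_mem _ hd0, hrest⟩
        · rintro ⟨d0, hd0, hrest⟩
          rcases List.mem_cons.mp hd0 with rfl | hd0'
          · exact absurd hrest.2.1 hp
          · exact ⟨d0, hd0', hrest⟩
    · rw [if_neg hg]
      rw [ih _ _ ⟨hroot, hvis⟩]
      constructor
      · rintro ⟨d0, hd0, hrest⟩
        exact ⟨d0, List.mem_cons_of_mem _ hd0, hrest⟩
      · rintro ⟨d0, hd0, hrest⟩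
        rcases List.mem_cons.mp hd0 with rfl | hd0'
        · -- the head offset satisfies inb ∧ P ∧ ≠ root, so the guard must have been true: contradiction
          obtain ⟨hinb, hp, hne⟩ := hrest
          exfalso
          simp only [Bool.and_eq_true, Bool.not_eq_true', bne_iff_ne] at hg
          push Not at hg
          have hxne : pvG place (i + d0.1) (j + d0.2) ≠ "X" := by rw [hp]; decide
          by_cases hv : visit (i + d0.1) (j + d0.2) = true
          · rcases hvis _ _ hv with heq | hnp
            · exact hne heq
            · exact hnp hp
          · exact hxne (hg ⟨hinb, by simpa using hv⟩)
        · exact ⟨d0, hd0', hrest⟩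

theorem procNbrs_some_inv (place : List (List String)) (pi pj dist i j : Int) (hd : dist ≤ 2) :
    ∀ (offs : List (Int × Int)) (visit : Int → Int → Bool) (q : List (Int × Int))
      (v' : Int → Int → Bool) (q' : List (Int × Int)),
      pvInv place pi pj visit →
      pvProcNbrs place dist i j offs visit q = some (v', q') →
      pvInv place pi pj v' := by
  intro offs
  induction offs with
  | nil =>
    intro visit q v' q' hInv hs
    simp only [pvProcNbrs, Option.some.injEq] at hs
    cases hs
    exact hInv
  | cons d rest ih =>
    intro visit q v' q' hInv hs
    simp only [pvProcNbrs] at hs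
    by_cases hg : (pvInb (i + d.1) (j + d.2) && !visit (i + d.1) (j + d.2) &&
        (pvG place (i + d.1) (j + d.2) != "X")) = true
    · rw [if_pos hg] at hs
      by_cases hp : pvG place (i + d.1) (j + d.2) = "P"
      · rw [if_pos (by rw [hp]; simp; omega)] at hs
        exact absurd hs (by simp)
      · rw [if_neg (by simp [hp])] at hs
        refine ih _ _ _ _ ?_ hs
        obtain ⟨hroot, hvis⟩ := hInv
        constructor
        · simp [hroot]
        · intro a b hab
          simp only [Bool.or_eq_true, Bool.and_eq_true, decide_eq_true_eq] at hab
          rcases hab with ⟨rfl, rfl⟩ | hab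
          · exact Or.inr hp
          · exact hvis a b hab
    · rw [if_neg hg] at hs
      exact ih _ _ _ _ hInv hs

theorem procNbrs_some_q (place : List (List String)) (dist i j : Int) (hd : dist ≤ 2) :
    ∀ (offs : List (Int × Int)) (visit : Int → Int → Bool) (q : List (Int × Int))
      (v' : Int → Int → Bool) (q' : List (Int × Int)),
      (offs.map (fun d => (i + d.1, j + d.2))).Nodup →
      pvProcNbrs place dist i j offs visit q = some (v', q') →
      q' = q ++ (offs.filter (fun d =>
          pvInb (i + d.1) (j + d.2) && !visit (i + d.1) (j + d.2) &&
            (pvG place (i + d.1) (j + d.2) != "X"))).map (fun d => (i + d.1, j + d.2)) := by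
  intro offs
  induction offs with
  | nil =>
    intro visit q v' q' _ hs
    simp only [pvProcNbrs, Option.some.injEq] at hs
    cases hs
    simp
  | cons d rest ih =>
    intro visit q v' q' hnd hs
    simp only [List.map_cons, List.nodup_cons, List.mem_map] at hnd
    obtain ⟨hne, hnd'⟩ := hnd
    simp only [pvProcNbrs] at hs
    by_cases hg : (pvInb (i + d.1) (j + d.2) && !visit (i + d.1) (j + d.2) &&
        (pvG place (i + d.1) (j + d.2) != "X")) = true
    · rw [if_pos hg] at hs
      by_cases hp : pvG place (i + d.1) (j + d.2) = "P"
      · rw [if_pos (by rw [hp]; simp; omega)] at hs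
        exact absurd hs (by simp)
      · rw [if_neg (by simp [hp])] at hs
        have hq' := ih _ _ _ _ hnd' hs
        -- the updated visit agrees with visit on all remaining (distinct) targets
        have hfeq : rest.filter (fun e =>
              pvInb (i + e.1) (j + e.2) &&
                !((decide (i + e.1 = i + d.1) && decide (j + e.2 = j + d.2)) || visit (i + e.1) (j + e.2)) &&
                (pvG place (i + e.1) (j + e.2) != "X")) =
            rest.filter (fun e =>
              pvInb (i + e.1) (j + e.2) && !visit (i + e.1) (j + e.2) &&
                (pvG place (i + e.1) (j + e.2) != "X")) := by
          apply List.filter_congr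
          intro e he
          have : ¬(i + e.1 = i + d.1 ∧ j + e.2 = j + d.2) := by
            intro ⟨e1, e2⟩
            exact hne ⟨e, he, by rw [Prod.mk.injEq]; exact ⟨e1, e2⟩⟩
          rcases Decidable.not_and_iff_not_or_not.mp this with h | h <;>
            simp [h]
        rw [hfeq] at hq'
        rw [hq', List.filter_cons_of_pos (by exact hg), List.map_cons]
        simp
    · rw [if_neg hg] at hs
      have hq' := ih _ _ _ _ hnd' hs
      rw [hq', List.filter_cons_of_neg (by simp [hg])]

theorem procLevel_none_iff (place : List (List String)) (pi pj dist : Int) (hd : dist ≤ 2) :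
    ∀ (q : List (Int × Int)) (visit : Int → Int → Bool) (acc : List (Int × Int)),
      pvInv place pi pj visit →
      (pvProcLevel place dist q visit acc = none ↔
        ∃ m ∈ q, ∃ d ∈ pvNbrs, pvInb (m.1 + d.1) (m.2 + d.2) = true ∧
          pvG place (m.1 + d.1) (m.2 + d.2) = "P" ∧ ¬(m.1 + d.1 = pi ∧ m.2 + d.2 = pj)) := by
  intro q
  induction q with
  | nil => intro visit acc _; simp [pvProcLevel]
  | cons m qs ih =>
    intro visit acc hInv
    simp only [pvProcLevel]
    cases hpn : pvProcNbrs place dist m.1 m.2 pvNbrs visit acc with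
    | none =>
      obtain ⟨d, hd0, hrest⟩ := (procNbrs_none_iff place pi pj dist m.1 m.2 hd _ _ _ hInv).mp hpn
      exact iff_of_true rfl ⟨m, List.mem_cons_self, d, hd0, hrest⟩
    | some r =>
      obtain ⟨v', acc'⟩ := r
      have hnohead := (procNbrs_none_iff place pi pj dist m.1 m.2 hd _ _ _ hInv).not.mp
        (by rw [hpn]; simp)
      have hInv' := procNbrs_some_inv place pi pj dist m.1 m.2 hd _ _ _ _ _ hInv hpn
      rw [ih _ _ hInv']
      constructor
      · rintro ⟨m0, hm0, hrest⟩
        exact ⟨m0, List.mem_cons_of_mem _ hm0, hrest⟩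
      · rintro ⟨m0, hm0, d, hdm, hrest⟩
        rcases List.mem_cons.mp hm0 with rfl | hm0'
        · exact absurd ⟨d, hdm, hrest⟩ hnohead
        · exact ⟨m0, hm0', d, hdm, hrest⟩

theorem procNbrs_deep (place : List (List String)) (dist i j : Int) (hd : 3 ≤ dist) :
    ∀ (offs : List (Int × Int)) (visit : Int → Int → Bool) (q : List (Int × Int)),
      pvProcNbrs place dist i j offs visit q ≠ none := by
  intro offs
  induction offs with
  | nil => intro visit q; simp [pvProcNbrs]
  | cons d rest ih =>
    intro visit q
    simp only [pvProcNbrs]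
    split
    · have h2 : decide (dist ≤ 2) = false := by simp; omega
      rw [h2]
      simp only [Bool.false_and, if_neg (by simp : ¬((false : Bool) = true))]
      exact ih _ _
    · exact ih _ _

theorem procLevel_deep (place : List (List String)) (dist : Int) (hd : 3 ≤ dist) :
    ∀ (q : List (Int × Int)) (visit : Int → Int → Bool) (acc : List (Int × Int)),
      pvProcLevel place dist q visit acc ≠ none := by
  intro q
  induction q with
  | nil => intro visit acc; simp [pvProcLevel]
  | cons m qs ih =>
    intro visit acc
    simp only [pvProcLevel]
    cases hpn : pvProcNbrs place dist m.1 m.2 pvNbrs visit acc with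
    | none => exact absurd hpn (procNbrs_deep place dist m.1 m.2 hd _ _ _)
    | some r => exact ih _ _

theorem pvBfs_deep (place : List (List String)) :
    ∀ (fuel : Nat) (q : List (Int × Int)) (visit : Int → Int → Bool) (dist : Int),
      2 ≤ dist → pvBfs place fuel q visit dist = false := by
  intro fuel
  induction fuel with
  | zero => intro q visit dist _; rfl
  | succ n ih =>
    intro q visit dist hd
    simp only [pvBfs]
    split
    · rfl
    · cases hpl : pvProcLevel place (dist + 1) q visit [] with
      | none => exact absurd hpl (procLevel_deep place (dist + 1) (by omega) _ _ _)
      | some r => exact ih _ _ _ (by omega)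

theorem E1_iff_check1 (place : List (List String)) (pi pj : Int) :
    (∃ d ∈ pvNbrs, pvInb (pi + d.1) (pj + d.2) = true ∧ pvG place (pi + d.1) (pj + d.2) = "P") ↔
      pvCheck1 place pi pj = true := by
  simp [pvCheck1, List.any_eq_true]

set_option maxHeartbeats 2000000 in
theorem E2_iff_check23 (place : List (List String)) (pi pj : Int)
    (h0 : 0 ≤ pi) (h1 : pi < 5) (h2 : 0 ≤ pj) (h3 : pj < 5) :
    (∃ d' ∈ pvNbrs, (pvInb (pi + d'.1) (pj + d'.2) = true ∧ pvG place (pi + d'.1) (pj + d'.2) ≠ "X") ∧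
      ∃ d ∈ pvNbrs, pvInb (pi + d'.1 + d.1) (pj + d'.2 + d.2) = true ∧
        pvG place (pi + d'.1 + d.1) (pj + d'.2 + d.2) = "P" ∧
        ¬(pi + d'.1 + d.1 = pi ∧ pj + d'.2 + d.2 = pj)) ↔
      (pvCheck2 place pi pj || pvCheck3 place pi pj) = true := by
  simp only [pvCheck2, pvCheck3, pvNbrs, pvStraight, pvDiag, List.any_cons, List.any_nil,
    List.mem_cons, Bool.or_eq_true, Bool.and_eq_true, beq_iff_eq,
    bne_iff_ne, pvInb_iff, List.not_mem_nil, or_false, exists_eq_or_imp, exists_eq_left]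
  have f22 : PySem.Int.floordiv 2 2 = 1 := by decide
  have fm22 : PySem.Int.floordiv (-2) 2 = -1 := by decide
  have f02 : PySem.Int.floordiv 0 2 = 0 := by decide
  simp only [f22, fm22, f02, add_assoc]
  norm_num
  constructor
  · rintro (⟨⟨hb, hx⟩, ⟨hbt, hp⟩ | ⟨hbt, hp⟩ | ⟨hbt, hp⟩⟩ | ⟨⟨hb, hx⟩, ⟨hbt, hp⟩ | ⟨hbt, hp⟩ | ⟨hbt, hp⟩⟩ |
      ⟨⟨hb, hx⟩, ⟨hbt, hp⟩ | ⟨hbt, hp⟩ | ⟨hbt, hp⟩⟩ | ⟨⟨hb, hx⟩, ⟨hbt, hp⟩ | ⟨hbt, hp⟩ | ⟨hbt, hp⟩⟩)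
    · exact Or.inl (Or.inl ⟨⟨hbt, hp⟩, hx⟩)
    · exact Or.inr (Or.inl ⟨⟨hbt, hp⟩, Or.inr hx⟩)
    · exact Or.inr (Or.inr (Or.inr (Or.inl ⟨⟨hbt, hp⟩, Or.inr hx⟩)))
    · exact Or.inl (Or.inr (Or.inl ⟨⟨hbt, hp⟩, hx⟩))
    · exact Or.inr (Or.inr (Or.inl ⟨⟨hbt, hp⟩, Or.inr hx⟩))
    · exact Or.inr (Or.inr (Or.inr (Or.inr ⟨⟨hbt, hp⟩, Or.inr hx⟩)))
    · exact Or.inr (Or.inl ⟨⟨hbt, hp⟩, Or.inl hx⟩)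
    · exact Or.inr (Or.inr (Or.inl ⟨⟨hbt, hp⟩, Or.inl hx⟩))
    · exact Or.inl (Or.inr (Or.inr (Or.inl ⟨⟨hbt, hp⟩, hx⟩)))
    · exact Or.inr (Or.inr (Or.inr (Or.inl ⟨⟨hbt, hp⟩, Or.inl hx⟩)))
    · exact Or.inr (Or.inr (Or.inr (Or.inr ⟨⟨hbt, hp⟩, Or.inl hx⟩)))
    · exact Or.inl (Or.inr (Or.inr (Or.inr ⟨⟨hbt, hp⟩, hx⟩)))
  · rintro ((⟨⟨hb, hp⟩, hx⟩ | ⟨⟨hb, hp⟩, hx⟩ | ⟨⟨hb, hp⟩, hx⟩ | ⟨⟨hb, hp⟩, hx⟩) |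
      (⟨⟨hb, hp⟩, hx | hx⟩ | ⟨⟨hb, hp⟩, hx | hx⟩ | ⟨⟨hb, hp⟩, hx | hx⟩ | ⟨⟨hb, hp⟩, hx | hx⟩))
    · exact Or.inl ⟨⟨by omega, hx⟩, Or.inl ⟨by omega, hp⟩⟩
    · exact Or.inr (Or.inl ⟨⟨by omega, hx⟩, Or.inl ⟨by omega, hp⟩⟩)
    · exact Or.inr (Or.inr (Or.inl ⟨⟨by omega, hx⟩, Or.inr (Or.inr ⟨by omega, hp⟩)⟩))
    · exact Or.inr (Or.inr (Or.inr ⟨⟨by omega, hx⟩, Or.inr (Or.inr ⟨by omega, hp⟩)⟩))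
    · exact Or.inr (Or.inr (Or.inl ⟨⟨by omega, hx⟩, Or.inl ⟨by omega, hp⟩⟩))
    · exact Or.inl ⟨⟨by omega, hx⟩, Or.inr (Or.inl ⟨by omega, hp⟩)⟩
    · exact Or.inr (Or.inr (Or.inl ⟨⟨by omega, hx⟩, Or.inr (Or.inl ⟨by omega, hp⟩)⟩))
    · exact Or.inr (Or.inl ⟨⟨by omega, hx⟩, Or.inr (Or.inl ⟨by omega, hp⟩)⟩)
    · exact Or.inr (Or.inr (Or.inr ⟨⟨by omega, hx⟩, Or.inl ⟨by omega, hp⟩⟩))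
    · exact Or.inl ⟨⟨by omega, hx⟩, Or.inr (Or.inr ⟨by omega, hp⟩)⟩
    · exact Or.inr (Or.inr (Or.inr ⟨⟨by omega, hx⟩, Or.inr (Or.inl ⟨by omega, hp⟩)⟩))
    · exact Or.inr (Or.inl ⟨⟨by omega, hx⟩, Or.inr (Or.inr ⟨by omega, hp⟩)⟩)

theorem pvBfs_succ (place : List (List String)) (fuel : Nat) (q : List (Int × Int))
    (visit : Int → Int → Bool) (dist : Int) :
    pvBfs place (fuel + 1) q visit dist =
      (if q.isEmpty then false
       else match pvProcLevel place (dist + 1) q visit [] with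
       | none => true
       | some (v', q') => pvBfs place fuel q' v' (dist + 1)) := rfl

theorem bfs_eq_direct (place : List (List String)) (pi pj : Int)
    (h0 : 0 ≤ pi) (h1 : pi < 5) (h2 : 0 ≤ pj) (h3 : pj < 5) :
    pvBfs place 30 [(pi, pj)] (fun a b => decide (a = pi) && decide (b = pj)) 0 =
      (pvCheck1 place pi pj || pvCheck2 place pi pj || pvCheck3 place pi pj) := by
  have hInv0 : pvInv place pi pj (fun a b => decide (a = pi) && decide (b = pj)) := by
    refine ⟨by simp, ?_⟩
    intro a b hab
    simp only [Bool.and_eq_true, decide_eq_true_eq] at hab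
    exact Or.inl hab
  have hrootne : ∀ d ∈ pvNbrs, ∀ (x y : Int), ¬(x + d.1 = x ∧ y + d.2 = y) := by
    intro d hd x y
    simp only [pvNbrs, List.mem_cons, List.not_mem_nil, or_false] at hd
    rcases hd with rfl | rfl | rfl | rfl <;> rintro ⟨e1, e2⟩ <;> omega
  have h30 : (30 : Nat) = 29 + 1 := rfl
  have h29 : (29 : Nat) = 28 + 1 := rfl
  rw [h30, pvBfs_succ]
  simp only [List.isEmpty_cons, if_neg (by decide : ¬(false = true))]
  cases hpn : pvProcNbrs place (0 + 1) pi pj pvNbrs (fun a b => decide (a = pi) && decide (b = pj)) [] with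
  | none =>
    have hL1 : pvProcLevel place (0 + 1) [(pi, pj)] (fun a b => decide (a = pi) && decide (b = pj)) [] = none := by
      simp only [pvProcLevel, hpn]
    rw [hL1]
    obtain ⟨d, hd, hinb, hp, -⟩ :=
      (procNbrs_none_iff place pi pj (0 + 1) pi pj (by omega) _ _ _ hInv0).mp hpn
    have hc1 : pvCheck1 place pi pj = true :=
      (E1_iff_check1 place pi pj).mp ⟨d, hd, hinb, hp⟩
    rw [hc1]
    rfl
  | some r =>
    obtain ⟨v1, q1⟩ := r
    have hL1 : pvProcLevel place (0 + 1) [(pi, pj)] (fun a b => decide (a = pi) && decide (b = pj)) [] =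
        some (v1, q1) := by
      simp only [pvProcLevel, hpn]
    rw [hL1]
    have hnoE1 : ¬∃ d ∈ pvNbrs, pvInb (pi + d.1) (pj + d.2) = true ∧
        pvG place (pi + d.1) (pj + d.2) = "P" ∧ ¬(pi + d.1 = pi ∧ pj + d.2 = pj) :=
      (procNbrs_none_iff place pi pj (0 + 1) pi pj (by omega) _ _ _ hInv0).not.mp
        (by rw [hpn]; simp)
    have hc1 : pvCheck1 place pi pj = false := by
      cases hc : pvCheck1 place pi pj
      · rfl
      · exfalso
        obtain ⟨d, hd, hinb, hp⟩ := (E1_iff_check1 place pi pj).mpr hc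
        exact hnoE1 ⟨d, hd, hinb, hp, hrootne d hd pi pj⟩
    have hInv1 : pvInv place pi pj v1 :=
      procNbrs_some_inv place pi pj (0 + 1) pi pj (by omega) _ _ _ _ _ hInv0 hpn
    have hnd : (pvNbrs.map (fun d => (pi + d.1, pj + d.2))).Nodup := by
      simp [pvNbrs, Prod.ext_iff]
    have hq1 : q1 = (pvNbrs.filter (fun d => pvInb (pi + d.1) (pj + d.2) &&
        (pvG place (pi + d.1) (pj + d.2) != "X"))).map (fun d => (pi + d.1, pj + d.2)) := by
      have := procNbrs_some_q place (0 + 1) pi pj (by omega) _ _ _ _ _ hnd hpn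
      rw [this, List.nil_append]
      congr 1
      apply List.filter_congr
      intro d hd
      have hne := hrootne d hd pi pj
      have hv0 : (!(decide (pi + d.1 = pi) && decide (pj + d.2 = pj))) = true := by
        simp only [Bool.not_eq_true', Bool.and_eq_false_iff, decide_eq_false_iff_not]
        by_cases h1 : pi + d.1 = pi
        · exact Or.inr (fun h2 => hne ⟨h1, h2⟩)
        · exact Or.inl h1
      rw [hv0]
      simp
    -- characterization of the second level's find condition
    have hE2iff : (∃ m ∈ q1, ∃ d ∈ pvNbrs, pvInb (m.1 + d.1) (m.2 + d.2) = true ∧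
          pvG place (m.1 + d.1) (m.2 + d.2) = "P" ∧ ¬(m.1 + d.1 = pi ∧ m.2 + d.2 = pj)) ↔
        (pvCheck2 place pi pj || pvCheck3 place pi pj) = true := by
      rw [← E2_iff_check23 place pi pj h0 h1 h2 h3]
      subst hq1
      constructor
      · rintro ⟨m, hm, d, hd, hrest⟩
        simp only [List.mem_map, List.mem_filter, Bool.and_eq_true, bne_iff_ne] at hm
        obtain ⟨d', ⟨hd', hinb', hx'⟩, rfl⟩ := hm
        exact ⟨d', hd', ⟨hinb', hx'⟩, d, hd, hrest⟩
      · rintro ⟨d', hd', ⟨hinb', hx'⟩, d, hd, hrest⟩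
        refine ⟨(pi + d'.1, pj + d'.2), ?_, d, hd, hrest⟩
        simp only [List.mem_map, List.mem_filter, Bool.and_eq_true, bne_iff_ne]
        exact ⟨d', ⟨hd', hinb', hx'⟩, rfl⟩
    show pvBfs place 29 q1 v1 (0 + 1) = _
    rw [h29, pvBfs_succ]
    by_cases hq1e : q1.isEmpty = true
    · rw [if_pos hq1e]
      have hnoE2 : ¬∃ m ∈ q1, ∃ d ∈ pvNbrs, pvInb (m.1 + d.1) (m.2 + d.2) = true ∧
          pvG place (m.1 + d.1) (m.2 + d.2) = "P" ∧ ¬(m.1 + d.1 = pi ∧ m.2 + d.2 = pj) := by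
        rintro ⟨m, hm, -⟩
        rw [List.isEmpty_iff.mp hq1e] at hm
        exact List.not_mem_nil hm
      have hc23 : (pvCheck2 place pi pj || pvCheck3 place pi pj) = false := by
        cases hc : (pvCheck2 place pi pj || pvCheck3 place pi pj)
        · rfl
        · exact absurd (hE2iff.mpr hc) hnoE2
      rw [hc1, Bool.false_or, hc23]
    · rw [if_neg hq1e]
      cases hL2 : pvProcLevel place (0 + 1 + 1) q1 v1 [] with
      | none =>
        have hE2 := (procLevel_none_iff place pi pj (0 + 1 + 1) (by omega) _ _ _ hInv1).mp hL2
        rw [hc1, Bool.false_or, hE2iff.mp hE2]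
      | some r2 =>
        obtain ⟨v2, q2⟩ := r2
        show pvBfs place 28 q2 v2 (0 + 1 + 1) = _
        rw [pvBfs_deep place 28 q2 v2 (0 + 1 + 1) (by omega)]
        have hnoE2 := (procLevel_none_iff place pi pj (0 + 1 + 1) (by omega) _ _ _ hInv1).not.mp
          (by rw [hL2]; simp)
        have hc23 : (pvCheck2 place pi pj || pvCheck3 place pi pj) = false := by
          cases hc : (pvCheck2 place pi pj || pvCheck3 place pi pj)
          · rfl
          · exact absurd (hE2iff.mpr hc) hnoE2
        rw [hc1, Bool.false_or, hc23]

theorem people_eq (place : List (List String)) : pvPeople place = pvPeopleB place := by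
  unfold pvPeople pvPeopleB
  rw [PySem.List.foldl_congr_mem (PySem.List.pyRange 0 5 1) _
      (fun acc i => acc ++ ((PySem.List.pyRange 0 5 1).filter
        (fun j => pvG place i j == "P")).map (fun j => ((i, j) : Int × Int))) []
      (fun acc x _ => PySem.List.foldl_append_if _ _ _ _),
    PySem.List.foldl_append_eq_flatMap]
  simp

theorem people_bounds (place : List (List String)) :
    ∀ m ∈ pvPeopleB place, 0 ≤ m.1 ∧ m.1 < 5 ∧ 0 ≤ m.2 ∧ m.2 < 5 := by
  intro m hm
  simp only [pvPeopleB, List.mem_flatMap, List.mem_map, List.mem_filter,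
    PySem.List.mem_pyRange_one] at hm
  obtain ⟨i, ⟨hi1, hi2⟩, j, ⟨⟨hj1, hj2⟩, _⟩, rfl⟩ := hm
  exact ⟨hi1, hi2, hj1, hj2⟩

theorem loop_eq (place : List (List String)) :
    ∀ people : List (Int × Int),
      (∀ m ∈ people, 0 ≤ m.1 ∧ m.1 < 5 ∧ 0 ≤ m.2 ∧ m.2 < 5) →
      pvLoopA place people = pvLoopB place people := by
  intro people
  induction people with
  | nil => intro _; rfl
  | cons m rest ih =>
    intro h
    obtain ⟨i, j⟩ := m
    obtain ⟨b0, b1, b2, b3⟩ := h (i, j) (by simp)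
    simp only [pvLoopA, pvLoopB]
    have hb : (fun a b => decide (a = (i, j).1) && decide (b = (i, j).2)) =
        (fun a b => decide (a = i) && decide (b = j)) := rfl
    rw [hb, bfs_eq_direct place i j b0 b1 b2 b3]
    have hrest := ih (fun m hm => h m (List.mem_cons_of_mem _ hm))
    cases h1 : pvCheck1 place i j <;> cases h2 : pvCheck2 place i j <;>
      cases h3 : pvCheck3 place i j <;> simp [hrest]

-- ===== VERDICT (by name: the statement is the Claim_ definition above) =====
theorem solve_spec : Claim_equal_solve := by
  intro place _ _
  unfold Spec_solve solve solve_alt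
  rw [people_eq]
  exact loop_eq place _ (people_bounds place)
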